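-- pv_equiv track=rewrite | github.com/msantelli/m_peirce | languages/english.py | apply_word_order
-- ===== SOURCE A (Python) =====
-- from typing import Dict, List, Tuple, Optional, Set, Any
--
-- def apply_word_order(components: Dict[str, str]) -> str:
--     """Apply English SVO word order."""
--     # Standard order: Subject Verb Object
--     parts = []
--
--     if 'subject' in components:
--         parts.append(components['subject'])
--     if 'verb' in components:
--         parts.append(components['verb'])
--     if 'object' in components:
--         parts.append(components['object'])
--
--     # Add other components
--     for key, value in components.items():
--         if key not in ['subject', 'verb', 'object']:
--             parts.append(value)
--
--     return ' '.join(parts)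
-- ===== SOURCE B (Python) =====
-- def apply_word_order(components):
--     """Apply English SVO word order."""
--     prio = {'subject': 0, 'verb': 1, 'object': 2}
--     ordered = sorted(components.items(), key=lambda kv: prio.get(kv[0], 3))
--     return ' '.join(value for _key, value in ordered)
-- ===== Notes on version B (the rewrite author's own statement) =====
-- stated objective: idiomatic
-- what changed: A's three explicit membership guards plus a second filtering pass over the dict are replaced by one table-driven stable sort of the items by an SVO priority map (default priority places all other keys after, in insertion order) followed by a single join.
import Mathlib
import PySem

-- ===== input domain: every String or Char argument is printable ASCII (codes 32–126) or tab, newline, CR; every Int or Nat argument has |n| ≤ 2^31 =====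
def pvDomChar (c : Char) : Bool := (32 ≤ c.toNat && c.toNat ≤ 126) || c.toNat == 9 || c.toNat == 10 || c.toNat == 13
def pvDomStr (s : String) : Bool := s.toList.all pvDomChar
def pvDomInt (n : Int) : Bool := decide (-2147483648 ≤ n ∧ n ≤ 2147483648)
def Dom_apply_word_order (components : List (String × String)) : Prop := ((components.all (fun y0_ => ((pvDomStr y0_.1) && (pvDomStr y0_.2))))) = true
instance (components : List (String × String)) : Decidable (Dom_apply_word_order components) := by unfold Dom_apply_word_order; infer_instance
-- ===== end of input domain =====

-- B replaces A's three membership guards plus a second filtering pass by ONE stable sort of the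
-- items under an SVO priority table, then a single join (objective: more idiomatic).

-- ===== PORT A =====
-- The dict parameter arrives as an association list; Python dict construction = PySem.Dict.ofList.
def apply_word_order (components : List (String × String)) : String :=
  let d := PySem.Dict.ofList components
  let parts : List String := []
  -- each lookup is guarded by the 'in' test, so the .getD "" default is never used
  let parts := if d.contains "subject" then parts ++ [(d.get? "subject").getD ""] else parts
  let parts := if d.contains "verb" then parts ++ [(d.get? "verb").getD ""] else parts
  let parts := if d.contains "object" then parts ++ [(d.get? "object").getD ""] else parts
  let parts := d.items.foldl
    (fun acc kv => if kv.1 ∉ (["subject", "verb", "object"] : List String) then acc ++ [kv.2] else acc)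
    parts
  PySem.Str.join " " parts

-- ===== PORT B =====
-- prio = {'subject': 0, 'verb': 1, 'object': 2}
def pvPrio : PySem.Dict String Int :=
  PySem.Dict.ofList [("subject", 0), ("verb", 1), ("object", 2)]

def apply_word_order_alt (components : List (String × String)) : String :=
  let d := PySem.Dict.ofList components
  let ordered := PySem.List.sorted d.items (fun kv => pvPrio.getD kv.1 3) false
  PySem.Str.join " " (ordered.map (fun kv => kv.2))

-- ===== PRECONDITION & SPEC =====
def Spec_apply_word_order (components : List (String × String)) (out : String) : Prop := out = apply_word_order_alt components
instance (components : List (String × String)) (out : String) : Decidable (Spec_apply_word_order components out) := by unfold Spec_apply_word_order; infer_instance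

-- ===== CLAIM (what is proved, stated in full; the proofs are below) =====
def Claim_equal_apply_word_order : Prop := ∀ (components : List (String × String)), Dom_apply_word_order components → Spec_apply_word_order components (apply_word_order components)

-- ===== LEMMAS AND PROOFS =====

-- the priority key, written out
theorem pvPrio_getD (k : String) :
    pvPrio.getD k 3 =
      (if k = "subject" then 0 else if k = "verb" then 1 else if k = "object" then 2 else 3) := by
  by_cases h1 : k = "subject"
  · subst h1; decide
  by_cases h2 : k = "verb"
  · subst h2; decide
  by_cases h3 : k = "object"
  · subst h3; decide
  have h : pvPrio = PySem.Dict.mk [("subject", 0), ("verb", 1), ("object", 2)] := by decide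
  rw [h]
  simp only [PySem.Dict.getD, PySem.Dict.get?, List.find?]
  simp [show ("subject" == k) = false from by simp [Ne.symm h1],
        show ("verb" == k) = false from by simp [Ne.symm h2],
        show ("object" == k) = false from by simp [Ne.symm h3], h1, h2, h3]

-- inserting x into a list split as (everything ≤ x) ++ (everything > x) puts x in the middle
theorem insertBy_append_mid {α : Type} (f : α → Int) (x : α) (A B : List α)
    (hA : ∀ y ∈ A, f y ≤ f x) (hB : ∀ y ∈ B, f x < f y) :
    PySem.List.insertBy (fun a b => decide (f a < f b)) x (A ++ B) = A ++ x :: B := by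
  induction A with
  | nil =>
    simp only [List.nil_append]
    cases B with
    | nil => rfl
    | cons b bs =>
      have hb : f x < f b := hB b (by simp)
      simp [PySem.List.insertBy, hb]
  | cons a as ih =>
    have ha : ¬ f x < f a := not_lt.mpr (hA a (by simp))
    simp only [List.cons_append, PySem.List.insertBy, decide_eq_true_eq, if_neg ha]
    rw [ih (fun y hy => hA y (by simp [hy]))]

-- stable insertion sort under a key with values in {0,1,2,3} is the concatenation of the four groups
theorem foldl_insertBy_partition {α : Type} (f : α → Int)
    (hf : ∀ x : α, f x = 0 ∨ f x = 1 ∨ f x = 2 ∨ f x = 3)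
    (l A0 A1 A2 A3 : List α)
    (h0 : ∀ y ∈ A0, f y = 0) (h1 : ∀ y ∈ A1, f y = 1)
    (h2 : ∀ y ∈ A2, f y = 2) (h3 : ∀ y ∈ A3, f y = 3) :
    l.foldl (fun acc x => PySem.List.insertBy (fun a b => decide (f a < f b)) x acc)
        (A0 ++ A1 ++ A2 ++ A3) =
      (A0 ++ l.filter (fun x => f x == 0)) ++ (A1 ++ l.filter (fun x => f x == 1)) ++
      (A2 ++ l.filter (fun x => f x == 2)) ++ (A3 ++ l.filter (fun x => f x == 3)) := by
  induction l generalizing A0 A1 A2 A3 with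
  | nil => simp
  | cons x t ih =>
    simp only [List.foldl_cons]
    rcases hf x with hx | hx | hx | hx
    · have step : PySem.List.insertBy (fun a b => decide (f a < f b)) x (A0 ++ A1 ++ A2 ++ A3) =
          (A0 ++ [x]) ++ A1 ++ A2 ++ A3 := by
        have := insertBy_append_mid f x A0 (A1 ++ A2 ++ A3)
          (fun y hy => by rw [h0 y hy, hx])
          (fun y hy => by
            rw [hx]
            simp only [List.append_assoc, List.mem_append] at hy
            rcases hy with hy | hy | hy
            · rw [h1 y hy]; norm_num
            · rw [h2 y hy]; norm_num
            · rw [h3 y hy]; norm_num)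
        simpa [List.append_assoc] using this
      rw [step, ih (A0 ++ [x]) A1 A2 A3
        (by intro y hy; rcases List.mem_append.mp hy with hy | hy
            · exact h0 y hy
            · simp at hy; subst hy; exact hx) h1 h2 h3]
      simp [hx, List.append_assoc]
    · have step : PySem.List.insertBy (fun a b => decide (f a < f b)) x (A0 ++ A1 ++ A2 ++ A3) =
          A0 ++ (A1 ++ [x]) ++ A2 ++ A3 := by
        have := insertBy_append_mid f x (A0 ++ A1) (A2 ++ A3)
          (fun y hy => by
            rw [hx]
            rcases List.mem_append.mp hy with hy | hy
            · rw [h0 y hy]; norm_num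
            · rw [h1 y hy])
          (fun y hy => by
            rw [hx]
            rcases List.mem_append.mp hy with hy | hy
            · rw [h2 y hy]; norm_num
            · rw [h3 y hy]; norm_num)
        simpa [List.append_assoc] using this
      rw [step, ih A0 (A1 ++ [x]) A2 A3 h0
        (by intro y hy; rcases List.mem_append.mp hy with hy | hy
            · exact h1 y hy
            · simp at hy; subst hy; exact hx) h2 h3]
      simp [hx, List.append_assoc]
    · have step : PySem.List.insertBy (fun a b => decide (f a < f b)) x (A0 ++ A1 ++ A2 ++ A3) =
          A0 ++ A1 ++ (A2 ++ [x]) ++ A3 := by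
        have := insertBy_append_mid f x (A0 ++ A1 ++ A2) A3
          (fun y hy => by
            rw [hx]
            simp only [List.append_assoc, List.mem_append] at hy
            rcases hy with hy | hy | hy
            · rw [h0 y hy]; norm_num
            · rw [h1 y hy]; norm_num
            · rw [h2 y hy])
          (fun y hy => by rw [hx, h3 y hy]; norm_num)
        simpa [List.append_assoc] using this
      rw [step, ih A0 A1 (A2 ++ [x]) A3 h0 h1
        (by intro y hy; rcases List.mem_append.mp hy with hy | hy
            · exact h2 y hy
            · simp at hy; subst hy; exact hx) h3]
      simp [hx, List.append_assoc]
    · have step : PySem.List.insertBy (fun a b => decide (f a < f b)) x (A0 ++ A1 ++ A2 ++ A3) =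
          A0 ++ A1 ++ A2 ++ (A3 ++ [x]) := by
        have := insertBy_append_mid f x (A0 ++ A1 ++ A2 ++ A3) []
          (fun y hy => by
            rw [hx]
            simp only [List.append_assoc, List.mem_append] at hy
            rcases hy with hy | hy | hy | hy
            · rw [h0 y hy]; norm_num
            · rw [h1 y hy]; norm_num
            · rw [h2 y hy]; norm_num
            · rw [h3 y hy])
          (fun y hy => by simp at hy)
        simpa [List.append_assoc] using this
      rw [step, ih A0 A1 A2 (A3 ++ [x]) h0 h1 h2
        (by intro y hy; rcases List.mem_append.mp hy with hy | hy
            · exact h3 y hy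
            · simp at hy; subst hy; exact hx)]
      simp [hx, List.append_assoc]

-- with unique keys, filtering an association list for one key yields the find? hit (or nothing)
theorem filter_key_eq_find {l : List (String × String)} (k0 : String)
    (hnd : (l.map Prod.fst).Nodup) :
    l.filter (fun p => p.1 == k0) =
      (match l.find? (fun p => p.1 == k0) with
       | some p => [p]
       | none => []) := by
  induction l with
  | nil => rfl
  | cons a t ih =>
    simp only [List.map_cons, List.nodup_cons] at hnd
    by_cases hk : a.1 = k0
    · have hnone : t.filter (fun p => p.1 == k0) = [] := by
        apply List.filter_eq_nil_iff.mpr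
        intro p hp hbeq
        exact hnd.1 (by
          have : p.1 = k0 := by simpa using hbeq
          rw [hk, ← this]
          exact List.mem_map.mpr ⟨p, hp, rfl⟩)
      simp [List.find?, hk, hnone]
    · have hbeq : (a.1 == k0) = false := by simpa using hk
      simp only [List.filter_cons, List.find?, hbeq]
      exact ih hnd.2

-- the per-key group of B's sort equals A's guarded singleton for that key
theorem group_eq_guard (d : PySem.Dict String String) (hnd : d.keys.Nodup) (k0 : String) :
    (d.items.filter (fun p => p.1 == k0)).map (fun kv => kv.2) =
      (if d.contains k0 then [(d.get? k0).getD ""] else []) := by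
  have hget : d.get? k0 = (d.items.find? (fun p => p.1 == k0)).map (fun x => x.2) := rfl
  have hcon : d.contains k0 = (d.get? k0).isSome := PySem.Dict.contains_eq_isSome_get? d k0
  have hnd' : (d.items.map Prod.fst).Nodup := hnd
  rw [filter_key_eq_find k0 hnd']
  cases hf : d.items.find? (fun p => p.1 == k0) with
  | none => simp [hcon, hget, hf]
  | some p => simp [hcon, hget, hf]

-- A's trailing loop collects exactly the values whose key is not subject/verb/object
theorem foldl_other (init : List String) (l : List (String × String)) :
    l.foldl (fun acc kv =>
        if kv.1 ∉ (["subject", "verb", "object"] : List String) then acc ++ [kv.2] else acc) init =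
      init ++ (l.filter (fun kv =>
        decide (kv.1 ∉ (["subject", "verb", "object"] : List String)))).map (fun kv => kv.2) := by
  induction l generalizing init with
  | nil => simp
  | cons x t ih =>
    rw [List.foldl_cons, List.filter_cons]
    by_cases hx : x.1 ∉ (["subject", "verb", "object"] : List String)
    · rw [if_pos hx, ih,
        show decide (x.1 ∉ (["subject", "verb", "object"] : List String)) = true from decide_eq_true hx]
      simp
    · rw [if_neg hx,
        show decide (x.1 ∉ (["subject", "verb", "object"] : List String)) = false from by simpa using hx]
      simpa using ih init

-- the four key groups, rewritten through the priority table
theorem filter_prio_zero (l : List (String × String)) :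
    l.filter (fun x => pvPrio.getD x.1 3 == 0) = l.filter (fun p => p.1 == "subject") := by
  apply List.filter_congr
  intro x _
  rw [pvPrio_getD]
  by_cases h1 : x.1 = "subject" <;> by_cases h2 : x.1 = "verb" <;> by_cases h3 : x.1 = "object" <;>
    simp_all

theorem filter_prio_one (l : List (String × String)) :
    l.filter (fun x => pvPrio.getD x.1 3 == 1) = l.filter (fun p => p.1 == "verb") := by
  apply List.filter_congr
  intro x _
  rw [pvPrio_getD]
  by_cases h1 : x.1 = "subject" <;> by_cases h2 : x.1 = "verb" <;> by_cases h3 : x.1 = "object" <;>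
    simp_all

theorem filter_prio_two (l : List (String × String)) :
    l.filter (fun x => pvPrio.getD x.1 3 == 2) = l.filter (fun p => p.1 == "object") := by
  apply List.filter_congr
  intro x _
  rw [pvPrio_getD]
  by_cases h1 : x.1 = "subject" <;> by_cases h2 : x.1 = "verb" <;> by_cases h3 : x.1 = "object" <;>
    simp_all

theorem filter_prio_three (l : List (String × String)) :
    l.filter (fun x => pvPrio.getD x.1 3 == 3) =
      l.filter (fun kv => decide (kv.1 ∉ (["subject", "verb", "object"] : List String))) := by
  apply List.filter_congr
  intro x _
  rw [pvPrio_getD]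
  by_cases h1 : x.1 = "subject" <;> by_cases h2 : x.1 = "verb" <;> by_cases h3 : x.1 = "object" <;>
    simp_all

theorem prio_cases (x : String × String) :
    pvPrio.getD x.1 3 = 0 ∨ pvPrio.getD x.1 3 = 1 ∨ pvPrio.getD x.1 3 = 2 ∨ pvPrio.getD x.1 3 = 3 := by
  rw [pvPrio_getD]
  split_ifs <;> simp

-- B's sorted items, written as A's four segments
theorem sorted_items_partition (d : PySem.Dict String String) :
    PySem.List.sorted d.items (fun kv => pvPrio.getD kv.1 3) false =
      d.items.filter (fun p => p.1 == "subject") ++ d.items.filter (fun p => p.1 == "verb") ++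
      d.items.filter (fun p => p.1 == "object") ++
      d.items.filter (fun kv => decide (kv.1 ∉ (["subject", "verb", "object"] : List String))) := by
  rw [PySem.List.sorted_eq_foldl_insertBy]
  have := foldl_insertBy_partition (fun kv : String × String => pvPrio.getD kv.1 3) prio_cases
    d.items [] [] [] []
    (by simp) (by simp) (by simp) (by simp)
  simp only [List.nil_append, List.append_nil] at this
  rw [this, filter_prio_zero, filter_prio_one, filter_prio_two, filter_prio_three]

-- ===== VERDICT (by name: the statement is the Claim_ definition above) =====
theorem apply_word_order_spec : Claim_equal_apply_word_order := by
  intro components _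
  unfold Spec_apply_word_order apply_word_order apply_word_order_alt
  dsimp only
  set d := PySem.Dict.ofList components with hd
  have hnd : d.keys.Nodup := PySem.Dict.nodup_keys_ofList components
  rw [sorted_items_partition d]
  simp only [List.map_append]
  rw [group_eq_guard d hnd "subject", group_eq_guard d hnd "verb", group_eq_guard d hnd "object",
    foldl_other]
  congr 1
  by_cases hs : d.contains "subject" = true <;> by_cases hv : d.contains "verb" = true <;>
    by_cases ho : d.contains "object" = true <;> simp [hs, hv, ho]
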